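-- pv_equiv track=rewrite | github.com/ddangchani/Algorithm | 프로그래머스/2/60058. 괄호 변환/괄호 변환.py | dfs
-- ===== SOURCE A (Python) =====
-- def _reverse(w):
--     ans = ''
--     for c in w:
--         if c == '(':
--             ans += ')'
--         else:
--             ans += '('
--     return ans
--
-- def separate(w):
--     cnt_left = 0
--     perfect = True
--     l = ''
--     for c in w:
--         l += c
--         if c == '(':
--             cnt_left += 1
--         else:
--             cnt_left -= 1
--
--         if cnt_left < 0: # check perfect
--             perfect = False
--         if cnt_left == 0:
--             break
--     return l, w[len(l):], perfect
--
-- def dfs(w):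
--     if w == '':
--         return ''
--     u, v, u_perfect = separate(w)
--     if u_perfect:
--         return u + dfs(v)
--     else:
--         return '(' + dfs(v) + ')' + _reverse(u[1:-1])
-- ===== SOURCE B (Python) =====
-- def _flip(w):
--     return ''.join(')' if c == '(' else '(' for c in w)
--
-- def _segments(w):
--     segs = []
--     cur = ''
--     bal = 0
--     neg = False
--     for c in w:
--         cur += c
--         bal += 1 if c == '(' else -1
--         if bal < 0:
--             neg = True
--         if bal == 0:
--             segs.append((cur, not neg))
--             cur = ''
--             neg = False
--     if cur:
--         segs.append((cur, not neg))
--     return segs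
--
-- def dfs(w):
--     acc = ''
--     for u, perfect in reversed(_segments(w)):
--         if perfect:
--             acc = u + acc
--         else:
--             acc = '(' + acc + ')' + _flip(u[1:-1])
--     return acc
-- ===== Notes on version B (the rewrite author's own statement) =====
-- stated objective: alternative
-- what changed: Replaces A's recursion (peel one balanced prefix, recurse on the rest) by a single left-to-right pass that splits the whole string into (segment, is_perfect) pairs at each return-to-zero of the balance counter, then folds that segment list from right to left into the answer.
import Mathlib
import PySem

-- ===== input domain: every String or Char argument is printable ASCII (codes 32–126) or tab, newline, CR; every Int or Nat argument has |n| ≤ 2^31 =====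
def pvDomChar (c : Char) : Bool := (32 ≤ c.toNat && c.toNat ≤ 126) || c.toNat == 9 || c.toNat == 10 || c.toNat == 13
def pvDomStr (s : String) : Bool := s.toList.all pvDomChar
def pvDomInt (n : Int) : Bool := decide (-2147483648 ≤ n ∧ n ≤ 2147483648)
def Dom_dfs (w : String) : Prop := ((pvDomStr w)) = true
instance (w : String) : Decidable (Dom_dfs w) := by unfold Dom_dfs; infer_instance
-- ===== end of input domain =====

-- B replaces A's linear recursion by one segmentation pass plus a reverse fold over the
-- segment list (alternative decomposition, same cost); same return value everywhere.

-- ===== PORT A =====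
def pvReverse (w : List Char) : List Char :=
  w.foldl (fun ans c => ans ++ [if c = '(' then ')' else '(']) []

def sepLoop : List Char → Int → Bool → List Char → List Char × List Char × Bool
  | [], _, perfect, l => (l, [], perfect)
  | c :: rest, cnt, perfect, l =>
    let l' := l ++ [c]
    let cnt' := if c = '(' then cnt + 1 else cnt - 1
    let perfect' := if cnt' < 0 then false else perfect
    if cnt' = 0 then (l', rest, perfect') else sepLoop rest cnt' perfect' l'

-- termination helper for dfsL (cited by the port's decreasing_by)
theorem sepLoop_len_le : ∀ (cs : List Char) (b : Int) (p : Bool) (l : List Char),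
    (sepLoop cs b p l).2.1.length ≤ cs.length
  | [], _, _, _ => Nat.le_refl _
  | c :: rest, b, p, l => by
    simp only [sepLoop]
    split_ifs
    all_goals try exact Nat.le_succ_of_le (sepLoop_len_le rest _ _ _)
    all_goals simp

theorem sepLoop_len_lt (c : Char) (rest : List Char) (b : Int) (p : Bool) (l : List Char) :
    (sepLoop (c :: rest) b p l).2.1.length < (c :: rest).length := by
  simp only [sepLoop]
  split_ifs
  all_goals try exact Nat.lt_succ_of_le (sepLoop_len_le rest _ _ _)
  all_goals simp

def dfsL : List Char → List Char
  | [] => []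
  | c :: rest =>
    let r := sepLoop (c :: rest) 0 true []
    if r.2.2 then r.1 ++ dfsL r.2.1
    else ['('] ++ dfsL r.2.1 ++ [')'] ++ pvReverse (PySem.List.slice r.1 (some 1) (some (-1)))
termination_by cs => cs.length
decreasing_by all_goals exact sepLoop_len_lt c rest 0 true []

def dfs (w : String) : String := String.ofList (dfsL w.toList)

-- ===== PORT B =====
def flipAlt (w : List Char) : List Char := w.map (fun c => if c = '(' then ')' else '(')

def segStep (st : List (List Char × Bool) × List Char × Int × Bool) (c : Char) :
    List (List Char × Bool) × List Char × Int × Bool :=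
  let cur := st.2.1 ++ [c]
  let bal := if c = '(' then st.2.2.1 + 1 else st.2.2.1 - 1
  let neg := if bal < 0 then true else st.2.2.2
  if bal = 0 then (st.1 ++ [(cur, !neg)], [], 0, false) else (st.1, cur, bal, neg)

def segments (cs : List Char) : List (List Char × Bool) :=
  let st := cs.foldl segStep ([], [], 0, false)
  if st.2.1 ≠ [] then st.1 ++ [(st.2.1, !st.2.2.2)] else st.1

def dfs_alt (w : String) : String :=
  String.ofList ((segments w.toList).reverse.foldl
    (fun acc ub =>
      if ub.2 then ub.1 ++ acc
      else ['('] ++ acc ++ [')'] ++ flipAlt (PySem.List.slice ub.1 (some 1) (some (-1)))) [])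

-- ===== PRECONDITION & SPEC =====
def Spec_dfs (w : String) (out : String) : Prop := out = dfs_alt w
instance (w : String) (out : String) : Decidable (Spec_dfs w out) := by unfold Spec_dfs; infer_instance

-- ===== CLAIM (what is proved, stated in full; the proofs are below) =====
def Claim_equal_dfs : Prop := ∀ (w : String), Dom_dfs w → Spec_dfs w (dfs w)

-- ===== LEMMAS AND PROOFS =====

-- reference segmentation shared by both proofs
def segRec : List Char → List (List Char × Bool)
  | [] => []
  | c :: rest =>
    let r := sepLoop (c :: rest) 0 true []
    (r.1, r.2.2) :: segRec r.2.1
termination_by cs => cs.length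
decreasing_by all_goals exact sepLoop_len_lt c rest 0 true []

theorem sepLoop_fst_ne_nil : ∀ (cs : List Char) (b : Int) (p : Bool) (l : List Char),
    (l ≠ [] ∨ cs ≠ []) → (sepLoop cs b p l).1 ≠ []
  | [], _, _, l, h => by
    simp only [sepLoop]
    rcases h with h | h
    · exact h
    · exact absurd rfl h
  | c :: rest, b, p, l, _ => by
    simp only [sepLoop]
    split_ifs
    all_goals try exact sepLoop_fst_ne_nil rest _ _ (l ++ [c]) (Or.inl (by simp))
    all_goals simp

theorem align : ∀ (cs : List Char) (bal : Int) (neg : Bool) (cur : List Char)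
    (segs : List (List Char × Bool)),
    (∃ bal' : Int,
        cs.foldl segStep (segs, cur, bal, neg)
          = (segs, (sepLoop cs bal (!neg) cur).1, bal', !(sepLoop cs bal (!neg) cur).2.2)
        ∧ (sepLoop cs bal (!neg) cur).2.1 = [])
    ∨ cs.foldl segStep (segs, cur, bal, neg)
        = (sepLoop cs bal (!neg) cur).2.1.foldl segStep
            (segs ++ [((sepLoop cs bal (!neg) cur).1, (sepLoop cs bal (!neg) cur).2.2)], [], 0, false)
  | [], bal, neg, cur, segs => Or.inl ⟨bal, by simp [sepLoop], rfl⟩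
  | c :: rest, bal, neg, cur, segs => by
    by_cases h0 : (if c = '(' then bal + 1 else bal - 1) = 0
    · right
      simp [sepLoop, segStep, h0]
    · by_cases hneg : (if c = '(' then bal + 1 else bal - 1) < 0
      · have := align rest (if c = '(' then bal + 1 else bal - 1) true (cur ++ [c]) segs
        simp only [Bool.not_true] at this
        simp only [List.foldl_cons, segStep, sepLoop]
        simpa [h0, hneg] using this
      · have := align rest (if c = '(' then bal + 1 else bal - 1) neg (cur ++ [c]) segs
        simp only [List.foldl_cons, segStep, sepLoop]
        simpa [h0, hneg] using this

def finalize (st : List (List Char × Bool) × List Char × Int × Bool) : List (List Char × Bool) :=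
  if st.2.1 ≠ [] then st.1 ++ [(st.2.1, !st.2.2.2)] else st.1

theorem key : ∀ (n : Nat) (cs : List Char), cs.length ≤ n → ∀ segs,
    finalize (cs.foldl segStep (segs, [], 0, false)) = segs ++ segRec cs := by
  intro n
  induction n with
  | zero =>
    intro cs h segs
    have : cs = [] := List.eq_nil_of_length_eq_zero (Nat.le_zero.mp h)
    subst this
    simp [segRec, finalize]
  | succ n ih =>
    intro cs h segs
    match cs with
    | [] => simp [segRec, finalize]
    | c :: rest =>
      rcases align (c :: rest) 0 false [] segs with ⟨bal', heq, hnil⟩ | heq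
      · simp only [Bool.not_false] at heq hnil
        rw [heq]
        have hne := sepLoop_fst_ne_nil (c :: rest) 0 true [] (Or.inr (by simp))
        simp only [segRec, finalize, hne, if_pos, ne_eq, not_false_iff, Bool.not_not]
        rw [hnil]
        simp [segRec]
      · simp only [Bool.not_false] at heq
        rw [heq]
        have hlt := sepLoop_len_lt c rest 0 true []
        have hlt' : (sepLoop (c :: rest) 0 true []).2.1.length < rest.length + 1 := by
          simpa using hlt
        rw [ih _ (by simp at h; omega) _]
        simp [segRec]

theorem pvReverse_eq_flipAlt (cs : List Char) : pvReverse cs = flipAlt cs := by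
  rw [pvReverse, flipAlt, PySem.List.foldl_append_singleton_eq_map]
  simp

theorem dfsL_eq : ∀ (n : Nat) (cs : List Char), cs.length ≤ n →
    dfsL cs = (segRec cs).foldr
      (fun ub acc =>
        if ub.2 then ub.1 ++ acc
        else ['('] ++ acc ++ [')'] ++ flipAlt (PySem.List.slice ub.1 (some 1) (some (-1)))) [] := by
  intro n
  induction n with
  | zero =>
    intro cs h
    have : cs = [] := List.eq_nil_of_length_eq_zero (Nat.le_zero.mp h)
    subst this
    simp [dfsL, segRec]
  | succ n ih =>
    intro cs h
    match cs with
    | [] => simp [dfsL, segRec]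
    | c :: rest =>
      have hlt := sepLoop_len_lt c rest 0 true []
      rw [dfsL, segRec, List.foldr_cons]
      have hlt' : (sepLoop (c :: rest) 0 true []).2.1.length < rest.length + 1 := by
        simpa using hlt
      rw [ih _ (by simp at h; omega)]
      by_cases hp : (sepLoop (c :: rest) 0 true []).2.2
      · simp [hp]
      · simp [hp, pvReverse_eq_flipAlt]

-- ===== VERDICT (by name: the statement is the Claim_ definition above) =====
theorem dfs_spec : Claim_equal_dfs := by
  intro w _
  unfold Spec_dfs dfs dfs_alt
  have hseg : segments w.toList = segRec w.toList := by
    have := key w.toList.length w.toList le_rfl []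
    simpa [segments, finalize] using this
  rw [List.foldl_reverse, hseg, dfsL_eq w.toList.length w.toList le_rfl]
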